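-- pv_equiv track=rewrite | github.com/TheRolf/MVTSP_exact | mvtsp_exact/enum_mv.py | directUndirectedTrees
-- ===== SOURCE A (Python) =====
-- def directUndirectedTrees(seq):
--     # Pruefer-sequence to graph
--     # https://en.wikipedia.org/wiki/Pr%C3%BCfer_sequence
--     N = len(seq) + 2
--     T = [[] for i in range(N-1)]
--     deg = [1 for i in range(N)]
--     for i in seq:
--         deg[i] += 1
--     k = 0
--     for i in seq:
--         for j in range(N):
--             if deg[j] == 1:
--                 T[k] = [i, j]
--                 k += 1
--                 deg[i] -= 1
--                 deg[j] -= 1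
--                 break
--     u, v = 0, 0
--     for i in range(N):
--         if deg[i] == 1:
--             if u == 0:
--                 u = i
--             else:
--                 v = i
--                 break
--     T[-1] = [v, u]
--
--     # all possible directed trees
--     for I in range(2**(N-1)):
--         yield [(e[0], e[1]) if (I >> i) & 1 else (e[1], e[0]) for i, e in enumerate(T)]
-- ===== SOURCE B (Python) =====
-- def directUndirectedTrees(seq):
--     # Pruefer decode without the O(N) rescan per element: a node's degree drops to 1
--     # right after the last step that mentions it, so precompute for every step which
--     # node becomes a leaf there, then keep the current leaves in a sorted list popped
--     # from the front.  No degree table is needed in the main loop.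
--     N = len(seq) + 2
--     last_ref = [None] * N
--     for t, i in enumerate(seq):
--         last_ref[i] = t
--     new_leaf = [None] * len(seq)  # new_leaf[t]: the node that becomes a leaf after step t
--     for c in range(N):
--         if last_ref[c] is not None:
--             new_leaf[last_ref[c]] = c
--     leaves = [c for c in range(N) if last_ref[c] is None]
--     T = []
--     for i, c in zip(seq, new_leaf):
--         j = leaves.pop(0)
--         T.append([i, j])
--         if c is not None:
--             p = 0
--             while p < len(leaves) and leaves[p] < c:
--                 p += 1
--             leaves.insert(p, c)
--     x, y = leaves
--     T.append([y, x])  # direction is immaterial: both orientations are enumerated below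
--
--     def orients(edges):
--         if not edges:
--             return [[]]
--         a, b = edges[0][0], edges[0][1]
--         out = []
--         for r in orients(edges[1:]):
--             out.append([(b, a)] + r)
--             out.append([(a, b)] + r)
--         return out
--
--     for d in orients(T):
--         yield d
-- ===== Notes on version B (the rewrite author's own statement) =====
-- stated objective: alternative
-- what changed: Tree decoding precomputes, per step, which node's degree drops to 1 (the step of that node's last occurrence in the sequence) and maintains the current leaves in a sorted list popped from the front, so the main loop needs neither a degree table nor A's O(N) rescan per element; orientations are enumerated by recursion on the edge list instead of A's 2^(N-1) bitmask loop.
-- intended difference: On sequences that are empty or whose last entry indexes node 0 (i.e. equals 0 or -(len(seq)+2)), node 0 is one of the two final leaves and A's 'u == 0' sentinel mistakes the found leaf 0 for 'not yet found', storing the last undirected edge as [0, b] instead of [b, 0] and so flipping that pair in every yielded orientation; B stores the final edge uniformly like all others, the intended behaviour since the stored direction of an undirected edge is arbitrary and the sentinel swap an accident. — e.g. on directUndirectedTrees([0]): A returns [[(1, 0), (2, 0)], [(0, 1), (2, 0)], [(1, 0), (0, 2)], [(0, 1), (0, 2)]], B returns [[(1, 0), (0, 2)], [(0, 1), (0, 2)],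 [(1, 0), (2, 0)], [(0, 1), (2, 0)]]
import Mathlib
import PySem

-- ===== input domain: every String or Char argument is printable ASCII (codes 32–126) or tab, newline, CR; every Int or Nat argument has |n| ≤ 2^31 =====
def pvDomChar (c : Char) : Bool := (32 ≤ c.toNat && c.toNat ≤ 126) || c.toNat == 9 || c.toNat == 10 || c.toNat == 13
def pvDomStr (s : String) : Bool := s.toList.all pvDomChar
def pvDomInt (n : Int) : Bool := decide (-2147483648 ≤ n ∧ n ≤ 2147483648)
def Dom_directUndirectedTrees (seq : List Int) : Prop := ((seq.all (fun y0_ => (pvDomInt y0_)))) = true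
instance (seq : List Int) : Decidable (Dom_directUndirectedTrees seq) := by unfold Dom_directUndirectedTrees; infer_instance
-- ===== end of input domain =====

-- B decodes the Prüfer sequence by precomputing, for every step, which node becomes a
-- leaf there (the step of that node's last occurrence), keeping the current leaves in a
-- sorted list popped from the front, and enumerating orientations recursively instead of
-- by bitmask; on sequences that are empty or whose last entry indexes node 0 the stored
-- direction of the final undirected edge differs from A's (stated as D_ below).


-- ===== PORT A =====
-- deg-building loop of A: 'deg = [1]*N; for i in seq: deg[i] += 1'
def pvDegInit (N : Nat) (seq : List Int) : List Int :=
  seq.foldl (fun deg i => PySem.List.pySetD deg i (PySem.List.pyGetD deg i 0 + 1))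
    (List.replicate N 1)

-- body of A's main loop: scan j in range(N) for the first deg[j]==1 (the break), fill slot k
def pvStepA (N : Nat) (st : List (List Int) × Nat × List Int) (i : Int) :
    List (List Int) × Nat × List Int :=
  match (List.range N).find? (fun j => st.2.2.getD j 0 == 1) with
  | some j =>
      let T := st.1.set st.2.1 [i, (j : Int)]
      let deg1 := PySem.List.pySetD st.2.2 i (PySem.List.pyGetD st.2.2 i 0 - 1)
      let deg2 := deg1.set j (deg1.getD j 0 - 1)
      (T, st.2.1 + 1, deg2)
  | none => st  -- Python: inner for-loop finds no leaf, nothing happens for this i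

-- 'u, v = 0, 0; for i in range(N): if deg[i]==1: (if u==0: u=i else: v=i; break)'
def pvUV : List Nat → List Int → Int × Int → Int × Int
  | [], _, uv => uv
  | j :: js, deg, uv =>
    if deg.getD j 0 == 1 then
      if uv.1 == 0 then pvUV js deg ((j : Int), uv.2) else (uv.1, (j : Int))
    else pvUV js deg uv

def directUndirectedTrees (seq : List Int) : List (List (Int × Int)) :=
  let N := seq.length + 2
  let deg0 := pvDegInit N seq
  let st := seq.foldl (pvStepA N) (List.replicate (N - 1) ([] : List Int), 0, deg0)
  let uv := pvUV (List.range N) st.2.2 (0, 0)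
  let T := st.1.set (st.1.length - 1) [uv.2, uv.1]   -- T[-1] = [v, u]
  (List.range (2 ^ (N - 1))).map (fun I =>
    (PySem.List.enumerate T).map (fun p =>
      -- e[0]/e[1]: Python would raise on an unfilled [] slot; unreachable under Pre_
      if (I >>> p.1.toNat) &&& 1 == 1 then (p.2.getD 0 0, p.2.getD 1 0)
      else (p.2.getD 1 0, p.2.getD 0 0)))

-- ===== PORT B =====
-- 'last_ref = [None]*N; for t, i in enumerate(seq): last_ref[i] = t'
def pvLastRef (N : Nat) (seq : List Int) : List (Option Int) :=
  (PySem.List.enumerate seq).foldl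
    (fun tb p => PySem.List.pySetD tb p.2 (some p.1))
    (List.replicate N none)

-- 'new_leaf = [None]*len(seq); for c in range(N): if last_ref[c] is not None: new_leaf[last_ref[c]] = c'
def pvNewLeaf (N : Nat) (seq : List Int) (lastRef : List (Option Int)) : List (Option Int) :=
  (List.range N).foldl
    (fun nl c =>
      match lastRef.getD c none with
      | some t => PySem.List.pySetD nl t (some (c : Int))
      | none => nl)
    (List.replicate seq.length none)

-- 'leaves = [c for c in range(N) if last_ref[c] is None]'
def pvLeaves0 (N : Nat) (lastRef : List (Option Int)) : List Int :=
  ((List.range N).filter (fun c => lastRef.getD c none == none)).map (fun c : Nat => (c : Int))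

-- 'p = 0; while p < len(leaves) and leaves[p] < c: p += 1; leaves.insert(p, c)'
def pvInsLeaf : List Int → Int → List Int
  | [], i => [i]
  | x :: xs, i => if x < i then x :: pvInsLeaf xs i else i :: x :: xs

-- body of B's main loop over zip(seq, new_leaf): pop the front leaf, append the edge,
-- insert the node (if any) that becomes a leaf after this step
def pvStepB (st : List (List Int) × List Int) (p : Int × Option Int) :
    List (List Int) × List Int :=
  match st.2 with
  | [] => st  -- Python: leaves.pop(0) raises IndexError; unreachable under Pre_
  | j :: rest =>
      let T := st.1 ++ [[p.1, j]]
      let leaves := match p.2 with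
        | some c => pvInsLeaf rest c
        | none => rest
      (T, leaves)

-- 'orients(edges)': recursion on the edge list, two appends per shorter orientation
def pvOrients : List (List Int) → List (List (Int × Int))
  | [] => [[]]
  | e :: rest =>
      (pvOrients rest).foldl (fun out r =>
        out ++ [(e.getD 1 0, e.getD 0 0) :: r, (e.getD 0 0, e.getD 1 0) :: r]) []

def directUndirectedTrees_alt (seq : List Int) : List (List (Int × Int)) :=
  let N := seq.length + 2
  let lastRef := pvLastRef N seq
  let newLeaf := pvNewLeaf N seq lastRef
  let leaves0 := pvLeaves0 N lastRef
  let st := (seq.zip newLeaf).foldl pvStepB (([] : List (List Int)), leaves0)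
  match st.2 with
  | [x, y] => pvOrients (st.1 ++ [[y, x]])
  | _ => []  -- Python: 'x, y = leaves' raises ValueError; unreachable under Pre_

-- ===== PRECONDITION & SPEC =====
-- Pre_ admits exactly the inputs A returns on: every entry must be a valid Python index
-- into the N = len(seq)+2 degree table (-N ≤ i < N); outside that A raises IndexError.
def Pre_directUndirectedTrees (seq : List Int) : Prop :=
  ∀ i ∈ seq, -((seq.length : Int) + 2) ≤ i ∧ i < (seq.length : Int) + 2
instance (seq : List Int) : Decidable (Pre_directUndirectedTrees seq) := by
  unfold Pre_directUndirectedTrees; infer_instance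

def pvWitness_directUndirectedTrees : List Int := [1]

-- On sequences that are empty or whose last entry indexes node 0 (= 0 or -(len+2)),
-- node 0 is one of the two final leaves and A's 'u == 0' sentinel mistakes the found
-- leaf 0 for 'not yet found', storing the final undirected edge as [0, b] instead of
-- [b, 0] and flipping that pair in every yielded orientation; B stores the final edge
-- uniformly like every other edge, the intended behaviour since the stored direction
-- of an undirected edge is arbitrary and the sentinel swap an accident.
def D_directUndirectedTrees (seq : List Int) : Prop :=
  seq = [] ∨ seq.getLast? = some 0 ∨ seq.getLast? = some (-((seq.length : Int) + 2))
instance (seq : List Int) : Decidable (D_directUndirectedTrees seq) := by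
  unfold D_directUndirectedTrees; infer_instance

def Spec_directUndirectedTrees (seq : List Int) (out : List (List (Int × Int))) : Prop :=
  ¬ D_directUndirectedTrees seq → out = directUndirectedTrees_alt seq
instance (seq : List Int) (out : List (List (Int × Int))) :
    Decidable (Spec_directUndirectedTrees seq out) := by
  unfold Spec_directUndirectedTrees; infer_instance

def pvDiffWitness_directUndirectedTrees : List Int := [0]
def pvDiffWitnessOut_directUndirectedTrees :
    (List (List (Int × Int))) × (List (List (Int × Int))) :=
  ([[(1, 0), (2, 0)], [(0, 1), (2, 0)], [(1, 0), (0, 2)], [(0, 1), (0, 2)]],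
   [[(1, 0), (0, 2)], [(0, 1), (0, 2)], [(1, 0), (2, 0)], [(0, 1), (2, 0)]])

-- ===== CLAIM (what is proved, stated in full; the proofs are below) =====
def Claim_unchanged_directUndirectedTrees : Prop :=
  ∀ (seq : List Int), Dom_directUndirectedTrees seq → Pre_directUndirectedTrees seq →
    Spec_directUndirectedTrees seq (directUndirectedTrees seq)
def Claim_changed_directUndirectedTrees : Prop :=
  Dom_directUndirectedTrees (pvDiffWitness_directUndirectedTrees) ∧
  Pre_directUndirectedTrees (pvDiffWitness_directUndirectedTrees) ∧
  D_directUndirectedTrees (pvDiffWitness_directUndirectedTrees) ∧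
  directUndirectedTrees (pvDiffWitness_directUndirectedTrees) = pvDiffWitnessOut_directUndirectedTrees.1 ∧
  directUndirectedTrees_alt (pvDiffWitness_directUndirectedTrees) = pvDiffWitnessOut_directUndirectedTrees.2 ∧
  pvDiffWitnessOut_directUndirectedTrees.1 ≠ pvDiffWitnessOut_directUndirectedTrees.2
def Claim_exact_directUndirectedTrees : Prop :=
  ∀ (seq : List Int), Dom_directUndirectedTrees seq → Pre_directUndirectedTrees seq →
    D_directUndirectedTrees seq → directUndirectedTrees seq ≠ directUndirectedTrees_alt seq

-- ===== LEMMAS AND PROOFS =====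

-- '[j for j in range(N) if deg[j] == 1]': the leaf list A's rescan walks, shared spec ---
def pvLeafList (N : Nat) (deg : List Int) : List Int :=
  ((List.range N).filter (fun j => deg.getD j 0 == 1)).map (fun j : Nat => (j : Int))

lemma mem_pvLeafList (N : Nat) (deg : List Int) (y : Int) :
    y ∈ pvLeafList N deg ↔ ∃ x : Nat, x < N ∧ y = (x : Int) ∧ deg.getD x 0 = 1 := by
  simp [pvLeafList, List.mem_filter, List.mem_range, List.mem_map]
  constructor
  · rintro ⟨x, ⟨hx, hd⟩, rfl⟩; exact ⟨x, hx, rfl, hd⟩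
  · rintro ⟨x, hx, rfl, hd⟩; exact ⟨x, ⟨hx, hd⟩, rfl⟩

lemma pairwise_pvLeafList (N : Nat) (deg : List Int) :
    (pvLeafList N deg).Pairwise (· < ·) := by
  unfold pvLeafList
  have h := (List.pairwise_lt_range (n := N)).filter (fun j => deg.getD j 0 == 1)
  exact List.Pairwise.map (fun j : Nat => (j : Int))
    (fun a b (hab : a < b) => by simpa using hab) h

lemma eq_of_pairwise_lt_of_mem_iff {l1 l2 : List Int}
    (h1 : l1.Pairwise (· < ·)) (h2 : l2.Pairwise (· < ·))
    (h : ∀ x, x ∈ l1 ↔ x ∈ l2) : l1 = l2 := by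
  have hp : l1.Perm l2 := (List.perm_ext_iff_of_nodup h1.nodup h2.nodup).mpr h
  exact hp.eq_of_pairwise (fun a b _ _ hab hba => absurd hba (not_lt.mpr hab.le)) h1 h2

lemma mem_pvInsLeaf (l : List Int) (i y : Int) :
    y ∈ pvInsLeaf l i ↔ y = i ∨ y ∈ l := by
  induction l with
  | nil => simp [pvInsLeaf]
  | cons x xs ih =>
    by_cases h : x < i
    · rw [pvInsLeaf, if_pos h]
      rw [List.mem_cons, ih, List.mem_cons]; tauto
    · rw [pvInsLeaf, if_neg h]
      simp only [List.mem_cons]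

lemma pairwise_pvInsLeaf (l : List Int) (i : Int)
    (hl : l.Pairwise (· < ·)) (hni : i ∉ l) : (pvInsLeaf l i).Pairwise (· < ·) := by
  induction l with
  | nil => simp [pvInsLeaf]
  | cons x xs ih =>
    rcases List.pairwise_cons.mp hl with ⟨hx, hxs⟩
    by_cases h : x < i
    · have : (pvInsLeaf xs i).Pairwise (· < ·) := ih hxs (fun hm => hni (by simp [hm]))
      simp only [pvInsLeaf, if_pos h]
      refine List.pairwise_cons.mpr ⟨?_, this⟩
      intro y hy
      rcases (mem_pvInsLeaf xs i y).mp hy with rfl | hy'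
      · exact h
      · exact hx y hy'
    · have hix : i < x := by
        rcases lt_or_eq_of_le (not_lt.mp h) with h' | h'
        · exact h'
        · exact absurd h'.symm (fun hh => hni (by simp [hh]))
      simp only [pvInsLeaf, if_neg h]
      refine List.pairwise_cons.mpr ⟨?_, hl⟩
      intro y hy
      rcases List.mem_cons.mp hy with rfl | hy'
      · exact hix
      · exact lt_trans hix (hx y hy')

-- getD after set, for in-range indices
lemma getD_set_lt {α : Type} (l : List α) (a x : Nat) (v d : α) (ha : a < l.length) :
    (l.set a v).getD x d = if x = a then v else l.getD x d := by
  by_cases hxa : x = a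
  · subst hxa; simp [List.getD, ha]
  · simp [List.getD, List.getElem?_set_ne (fun h => hxa h.symm), hxa]

-- Python indexing into an N-table, for any in-range index (negative allowed):
-- tb[i] addresses cell (i mod N)
lemma pyGetD_mod (deg : List Int) (N : Nat) (i : Int) (hlen : deg.length = N)
    (h1 : -(N : Int) ≤ i) (h2 : i < (N : Int)) (hN : 0 < N) :
    PySem.List.pyGetD deg i (0 : Int) = deg.getD ((PySem.Int.mod i (N : Int)).toNat) 0 := by
  have hm0 : 0 ≤ PySem.Int.mod i (N : Int) := PySem.Int.mod_nonneg i (by exact_mod_cast hN)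
  have hmN : PySem.Int.mod i (N : Int) < (N : Int) := PySem.Int.mod_lt i (by exact_mod_cast hN)
  have hme : PySem.Int.mod i (N : Int) = i % (N : Int) :=
    PySem.Int.mod_eq_emod_of_pos (by exact_mod_cast hN)
  by_cases h0 : 0 ≤ i
  · rw [PySem.List.pyGetD_eq_getElem _ _ h0 (by omega),
      List.getD_eq_getElem _ _ (by omega)]
    congr 1
    rw [hme, Int.emod_eq_of_lt h0 h2]
  · have hk : -(((-i).toNat : Nat) : Int) = i := by omega
    have hout := PySem.List.pyGetD_neg_natCast deg (-i).toNat (0 : Int) (by omega) (by omega)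
    rw [hk] at hout
    rw [hout, List.getD_eq_getElem _ _ (by omega)]
    have h3 : i % (N : Int) = i + N := by
      have h4 : (i + (N : Int) * 1) % (N : Int) = i % (N : Int) :=
        Int.add_mul_emod_self_left i (N : Int) 1
      rw [mul_one] at h4
      rw [← h4, Int.emod_eq_of_lt (by omega) (by omega)]
    congr 1
    rw [hme, h3]
    omega

lemma pySetD_mod {α : Type} (tb : List α) (N : Nat) (i : Int) (v : α) (hlen : tb.length = N)
    (h1 : -(N : Int) ≤ i) (h2 : i < (N : Int)) (hN : 0 < N) :
    PySem.List.pySetD tb i v = tb.set ((PySem.Int.mod i (N : Int)).toNat) v := by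
  have hme : PySem.Int.mod i (N : Int) = i % (N : Int) :=
    PySem.Int.mod_eq_emod_of_pos (by exact_mod_cast hN)
  by_cases h0 : 0 ≤ i
  · rw [PySem.List.pySetD_of_nonneg _ _ h0]
    congr 1
    rw [hme, Int.emod_eq_of_lt h0 h2]
  · rw [PySem.List.pySetD, PySem.List.pySet?, PySem.List.pyIdx?,
      if_neg h0, if_pos (by omega)]
    simp only [Option.map_some, Option.getD_some]
    have h3 : i % (N : Int) = i + N := by
      have h4 : (i + (N : Int) * 1) % (N : Int) = i % (N : Int) :=
        Int.add_mul_emod_self_left i (N : Int) 1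
      rw [mul_one] at h4
      rw [← h4, Int.emod_eq_of_lt (by omega) (by omega)]
    congr 1
    rw [hme, h3]
    omega

-- find? over range N returns 0 when cell 0 qualifies
lemma find_zero (N : Nat) (deg : List Int) (hN : 0 < N) (h0 : deg.getD 0 0 = 1) :
    (List.range N).find? (fun j => deg.getD j 0 == 1) = some 0 := by
  obtain ⟨m, rfl⟩ : ∃ m, N = m + 1 := ⟨N - 1, by omega⟩
  rw [List.range_succ_eq_map]
  exact List.find?_cons_of_pos (by simpa using h0)

-- the decode invariant (over the list of addressed CELLS, i.e. entries mod N) ---------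

def PvInv (N : Nat) (rem deg : List Int) : Prop :=
  deg.length = N ∧
  (∀ x : Nat, x < N → deg.getD x 0 = 0 ∨ deg.getD x 0 = 1 + rem.count (x : Int)) ∧
  (∀ x : Nat, x < N → deg.getD x 0 = 0 → ((x : Int) ∉ rem)) ∧
  ((Finset.range N).filter (fun x => deg.getD x 0 = 0)).card + rem.length + 2 = N

-- the 'node that becomes a leaf per step' list B precomputes, described step-locally
def PvNL (N : Nat) : List Int → List (Option Int) → Prop
  | [], nls => nls = []
  | x :: xs, nls => ∃ o os, nls = o :: os ∧
      o = (if PySem.Int.mod x (N : Int) ∈ xs.map (fun v => PySem.Int.mod v (N : Int))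
           then none else some (PySem.Int.mod x (N : Int))) ∧
      PvNL N xs os

-- at least two leaves while the invariant holds
lemma pvLeaf_card (N : Nat) (rem deg : List Int) (hinv : PvInv N rem deg) :
    rem.length + 2 ≤ ((Finset.range N).filter (fun x => deg.getD x 0 = 1)).card +
      ((Finset.range N).filter (fun x : Nat => (x : Int) ∈ rem)).card := by
  obtain ⟨hlen, hchar, hzero, hcard⟩ := hinv
  classical
  have h1 := Finset.card_filter_add_card_filter_not (s := Finset.range N)
    (fun x => deg.getD x 0 = 0)
  rw [Finset.card_range] at h1
  have h3 : (((Finset.range N).filter (fun x => ¬ deg.getD x 0 = 0)).filter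
      (fun x => deg.getD x 0 = 1)).card
      ≤ ((Finset.range N).filter (fun x => deg.getD x 0 = 1)).card := by
    refine Finset.card_le_card (fun x hx => ?_)
    simp only [Finset.mem_filter] at hx ⊢
    exact ⟨hx.1.1, hx.2⟩
  have h4 : (((Finset.range N).filter (fun x => ¬ deg.getD x 0 = 0)).filter
      (fun x => ¬ deg.getD x 0 = 1)).card
      ≤ ((Finset.range N).filter (fun x : Nat => (x : Int) ∈ rem)).card := by
    refine Finset.card_le_card (fun x hx => ?_)
    simp only [Finset.mem_filter] at hx ⊢
    obtain ⟨⟨hxr, hnz⟩, hn1⟩ := hx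
    refine ⟨hxr, ?_⟩
    rcases hchar x (Finset.mem_range.mp hxr) with h0 | hc
    · exact absurd h0 hnz
    · by_contra hmem
      rw [List.count_eq_zero_of_not_mem hmem] at hc
      simp at hc
      exact hn1 hc
  have h2 := Finset.card_filter_add_card_filter_not
    (s := (Finset.range N).filter (fun x => ¬ deg.getD x 0 = 0))
    (fun x => deg.getD x 0 = 1)
  omega

lemma finset_filter_range_card (N : Nat) (q : Nat → Prop) [DecidablePred q] :
    ((Finset.range N).filter q).card = ((List.range N).filter (fun x => decide (q x))).length := by
  simp [Finset.filter, Finset.range, Multiset.range, Finset.card]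

-- membership count bound: the casts of a finset of naturals all lying in rem
lemma mem_filter_card_le (N : Nat) (rem : List Int) :
    ((Finset.range N).filter (fun x : Nat => (x : Int) ∈ rem)).card ≤ rem.length := by
  have h1 : ((Finset.range N).filter (fun x : Nat => (x : Int) ∈ rem)).card ≤ rem.toFinset.card := by
    refine Finset.card_le_card_of_injOn (fun x => (x : Int)) ?_ ?_
    · intro x hx; rcases Finset.mem_filter.mp hx with ⟨_, hm⟩
      exact List.mem_toFinset.mpr hm
    · intro a _ b _ h
      exact Int.natCast_inj.mp h
  exact le_trans h1 (List.toFinset_card_le rem)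

lemma pvLeafList_length (N : Nat) (deg : List Int) :
    (pvLeafList N deg).length
      = ((Finset.range N).filter (fun x => deg.getD x 0 = 1)).card := by
  unfold pvLeafList
  rw [List.length_map, finset_filter_range_card]
  congr 1

-- the one-step simulation
lemma pvStep_sim (N : Nat) (i : Int) (o : Option Int) (rem deg : List Int)
    (TB : List (List Int)) (k : Nat)
    (hi0 : -(N : Int) ≤ i) (hiN : i < (N : Int))
    (hinv : PvInv N ((i :: rem).map (fun v => PySem.Int.mod v (N : Int))) deg)
    (ho : o = if PySem.Int.mod i (N : Int) ∈ rem.map (fun v => PySem.Int.mod v (N : Int))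
          then none else some (PySem.Int.mod i (N : Int)))
    (hk : k = ((Finset.range N).filter (fun x => deg.getD x 0 = 0)).card)
    (hTB : TB.length = k) :
    ∃ (j' : Nat) (rest : List Int) (deg2 : List Int),
      j' < N ∧ pvLeafList N deg = (j' : Int) :: rest ∧
      pvStepA N (TB ++ List.replicate (N - 1 - k) [], k, deg) i
        = (TB ++ [[i, (j' : Int)]] ++ List.replicate (N - 1 - (k + 1)) [], k + 1, deg2) ∧
      pvStepB (TB, pvLeafList N deg) (i, o)
        = (TB ++ [[i, (j' : Int)]], pvLeafList N deg2) ∧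
      PvInv N (rem.map (fun v => PySem.Int.mod v (N : Int))) deg2 ∧
      k + 1 = ((Finset.range N).filter (fun x => deg2.getD x 0 = 0)).card ∧
      (deg2.getD 0 0 = 1 ↔ (PySem.Int.mod i (N : Int) = 0 ∧
        ((0 : Nat) : Int) ∉ rem.map (fun v => PySem.Int.mod v (N : Int)))) := by
  obtain ⟨hlen, hchar, hzero, hcard⟩ := hinv
  have hmlen : ((i :: rem).map (fun v => PySem.Int.mod v (N : Int))).length
      = rem.length + 1 := by simp
  have hN0 : 0 < N := by omega
  have hm0 : 0 ≤ PySem.Int.mod i (N : Int) := PySem.Int.mod_nonneg i (by exact_mod_cast hN0)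
  have hmN : PySem.Int.mod i (N : Int) < (N : Int) := PySem.Int.mod_lt i (by exact_mod_cast hN0)
  set ci := (PySem.Int.mod i (N : Int)).toNat with hcidef
  have hci : ((ci : Nat) : Int) = PySem.Int.mod i (N : Int) := Int.toNat_of_nonneg hm0
  have hciN : ci < N := by omega
  have hmemi : ((ci : Nat) : Int) ∈ (i :: rem).map (fun v => PySem.Int.mod v (N : Int)) := by
    rw [List.map_cons, hci]
    exact List.mem_cons_self
  -- the current node's cell has degree ≥ 2
  have hdi : deg.getD ci 0
      = 1 + (((i :: rem).map (fun v => PySem.Int.mod v (N : Int))).count ((ci : Nat) : Int)) := by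
    rcases hchar ci hciN with h0 | h1
    · exact absurd hmemi (hzero ci hciN h0)
    · exact h1
  have hcntpos : 0 < ((i :: rem).map (fun v => PySem.Int.mod v (N : Int))).count ((ci : Nat) : Int) :=
    List.count_pos_iff.mpr hmemi
  have hdi2 : 2 ≤ deg.getD ci 0 := by omega
  -- at least two leaves exist
  have hcard2 := pvLeaf_card N ((i :: rem).map (fun v => PySem.Int.mod v (N : Int))) deg
    ⟨hlen, hchar, hzero, hcard⟩
  have hmle := mem_filter_card_le N ((i :: rem).map (fun v => PySem.Int.mod v (N : Int)))
  have hlen2 : 2 ≤ (pvLeafList N deg).length := by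
    rw [pvLeafList_length]
    rw [hmlen] at hcard2 hmle
    omega
  rcases hL : pvLeafList N deg with _ | ⟨y, rest⟩
  · rw [hL] at hlen2; simp at hlen2
  obtain ⟨j', hj'N, rfl, hdegj⟩ := (mem_pvLeafList N deg y).mp (by rw [hL]; simp)
  have hij : ci ≠ j' := by
    intro h; rw [h, hdegj] at hdi2; omega
  -- the filtered index list starts with j'
  obtain ⟨tl, hF, hrest⟩ : ∃ tl, (List.range N).filter (fun j => deg.getD j 0 == 1)
      = j' :: tl ∧ rest = tl.map (fun j : Nat => (j : Int)) := by
    have hmap : ((List.range N).filter (fun j => deg.getD j 0 == 1)).map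
        (fun j : Nat => (j : Int)) = (j' : Int) :: rest := hL
    rcases hFc : (List.range N).filter (fun j => deg.getD j 0 == 1) with _ | ⟨a, tl⟩
    · rw [hFc] at hmap; simp at hmap
    · rw [hFc] at hmap
      simp only [List.map_cons, List.cons.injEq] at hmap
      obtain ⟨ha, hrest⟩ := hmap
      have haj : a = j' := by exact_mod_cast ha
      exact ⟨tl, by rw [haj], hrest.symm⟩
  have hfind : (List.range N).find? (fun j => deg.getD j 0 == 1) = some j' := by
    rw [← List.head?_filter, hF]; rfl
  -- the common degree update
  set deg1 := deg.set ci (deg.getD ci 0 - 1) with hdeg1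
  set deg2 := deg1.set j' (deg1.getD j' 0 - 1) with hdeg2
  have hlen1 : deg1.length = N := by rw [hdeg1, List.length_set, hlen]
  have hlenn2 : deg2.length = N := by rw [hdeg2, List.length_set, hlen1]
  have hd1 : ∀ x : Nat, deg1.getD x 0
      = if x = ci then deg.getD ci 0 - 1 else deg.getD x 0 :=
    fun x => getD_set_lt deg ci x _ _ (by omega)
  have hd2 : ∀ x : Nat, deg2.getD x 0
      = if x = j' then 0 else if x = ci then deg.getD ci 0 - 1
        else deg.getD x 0 := by
    intro x
    rw [hdeg2, getD_set_lt deg1 j' x _ _ (by omega)]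
    by_cases hxj : x = j'
    · rw [if_pos hxj, if_pos hxj, hd1 j', if_neg (fun h => hij h.symm), hdegj]
      norm_num
    · rw [if_neg hxj, if_neg hxj, hd1 x]
  have hknum : k + 3 ≤ N := by
    rw [hmlen] at hcard; omega
  -- count bookkeeping (on the cell list)
  have hcnti : ((i :: rem).map (fun v => PySem.Int.mod v (N : Int))).count ((ci : Nat) : Int)
      = (rem.map (fun v => PySem.Int.mod v (N : Int))).count ((ci : Nat) : Int) + 1 := by
    rw [List.map_cons, List.count_cons, if_pos (by rw [hci]; simp)]
  have hcntne : ∀ x : Nat, x ≠ ci →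
      ((i :: rem).map (fun v => PySem.Int.mod v (N : Int))).count ((x : Nat) : Int)
        = (rem.map (fun v => PySem.Int.mod v (N : Int))).count ((x : Nat) : Int) := by
    intro x hx
    rw [List.map_cons, List.count_cons, if_neg (by rw [← hci]; simp; omega)]
    omega
  -- A's step
  have hsetdeg : PySem.List.pySetD deg i (PySem.List.pyGetD deg i 0 - 1) = deg1 := by
    rw [pySetD_mod deg N i _ hlen hi0 hiN hN0, pyGetD_mod deg N i hlen hi0 hiN hN0,
      ← hcidef]
  have hA : pvStepA N (TB ++ List.replicate (N - 1 - k) [], k, deg) i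
      = (TB ++ [[i, (j' : Int)]] ++ List.replicate (N - 1 - (k + 1)) [], k + 1, deg2) := by
    unfold pvStepA
    dsimp only
    rw [hfind]
    dsimp only
    rw [hsetdeg, ← hdeg2]
    have hrep : N - 1 - k = (N - 1 - (k + 1)) + 1 := by omega
    rw [hrep, List.replicate_succ, ← hTB]
    simp
  -- the new leaf list
  have hpwL := pairwise_pvLeafList N deg
  rw [hL] at hpwL
  obtain ⟨hjlt, hpwrest⟩ := List.pairwise_cons.mp hpwL
  have hjrest : ((j' : Nat) : Int) ∉ rest := fun hm => lt_irrefl _ (hjlt _ hm)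
  have hcirest : ((ci : Nat) : Int) ∉ rest := by
    intro hm
    have : ((ci : Nat) : Int) ∈ pvLeafList N deg := by
      rw [hL]; exact List.mem_cons_of_mem _ hm
    obtain ⟨x, hxN, hxi, hdx⟩ := (mem_pvLeafList N deg _).mp this
    have hxi' : x = ci := by exact_mod_cast hxi.symm
    rw [← hxi', hdx] at hdi2
    omega
  have hmaster : ∀ y : Int, y ∈ pvLeafList N deg2
      ↔ ((y = ((ci : Nat) : Int) ∧ deg2.getD ci 0 = 1) ∨ y ∈ rest) := by
    intro y
    rw [mem_pvLeafList]
    constructor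
    · rintro ⟨x, hxN, rfl, hdx2⟩
      rw [hd2 x] at hdx2
      by_cases hxj : x = j'
      · rw [if_pos hxj] at hdx2; omega
      · rw [if_neg hxj] at hdx2
        by_cases hxi : x = ci
        · left
          refine ⟨by rw [hxi], ?_⟩
          rw [hd2 ci, if_neg hij, if_pos rfl]
          rw [if_pos hxi] at hdx2
          exact hdx2
        · right
          rw [if_neg hxi] at hdx2
          have hmem : ((x : Nat) : Int) ∈ pvLeafList N deg :=
            (mem_pvLeafList N deg _).mpr ⟨x, hxN, rfl, hdx2⟩
          rw [hL] at hmem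
          rcases List.mem_cons.mp hmem with heq | hmem'
          · exact absurd (by exact_mod_cast heq : x = j') hxj
          · exact hmem'
    · rintro (⟨hyi, hc⟩ | hm)
      · rw [hyi]; exact ⟨ci, hciN, rfl, hc⟩
      · have : y ∈ pvLeafList N deg := by rw [hL]; exact List.mem_cons_of_mem _ hm
        obtain ⟨x, hxN, rfl, hdx⟩ := (mem_pvLeafList N deg y).mp this
        refine ⟨x, hxN, rfl, ?_⟩
        have hxj : x ≠ j' := by
          intro h; rw [h] at hm; exact hjrest hm
        have hxi : x ≠ ci := by
          intro h; rw [← h, hdx] at hdi2; omega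
        rw [hd2 x, if_neg hxj, if_neg hxi]
        exact hdx
  -- the condition B precomputed, translated to deg2's cell for i
  have hdeg2ci : deg2.getD ci 0
      = 1 + (rem.map (fun v => PySem.Int.mod v (N : Int))).count ((ci : Nat) : Int) := by
    rw [hd2 ci, if_neg hij, if_pos rfl, hdi, hcnti]
    push_cast
    ring
  have hcond : deg2.getD ci 0 = 1
      ↔ ((ci : Nat) : Int) ∉ rem.map (fun v => PySem.Int.mod v (N : Int)) := by
    rw [hdeg2ci]
    constructor
    · intro h hm
      have := List.count_pos_iff.mpr hm
      omega
    · intro hnm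
      rw [List.count_eq_zero_of_not_mem hnm]
      simp
  have hrest_eq : ¬ deg2.getD ci 0 = 1 → rest = pvLeafList N deg2 := by
    intro hc
    refine eq_of_pairwise_lt_of_mem_iff hpwrest
      (pairwise_pvLeafList N deg2) (fun y => ?_)
    rw [hmaster y]
    constructor
    · exact fun hmm => Or.inr hmm
    · rintro (⟨rfl, hc'⟩ | hmm)
      · exact absurd hc' hc
      · exact hmm
  have hins_eq : deg2.getD ci 0 = 1 →
      pvInsLeaf rest ((ci : Nat) : Int) = pvLeafList N deg2 := by
    intro hc
    refine eq_of_pairwise_lt_of_mem_iff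
      (pairwise_pvInsLeaf rest _ hpwrest hcirest)
      (pairwise_pvLeafList N deg2) (fun y => ?_)
    rw [mem_pvInsLeaf, hmaster y]
    constructor
    · rintro (rfl | hmm)
      · exact Or.inl ⟨rfl, hc⟩
      · exact Or.inr hmm
    · rintro (⟨rfl, -⟩ | hmm)
      · exact Or.inl rfl
      · exact Or.inr hmm
  -- B's step
  have hB : pvStepB (TB, ((j' : Nat) : Int) :: rest) (i, o)
      = (TB ++ [[i, (j' : Int)]], pvLeafList N deg2) := by
    by_cases hm : ((ci : Nat) : Int) ∈ rem.map (fun v => PySem.Int.mod v (N : Int))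
    · have ho' : o = none := by
        rw [ho, if_pos (by simpa [hci] using hm)]
      rw [ho']
      unfold pvStepB
      dsimp only
      rw [hrest_eq (fun h => (hcond.mp h) hm)]
    · have ho' : o = some (PySem.Int.mod i (N : Int)) := by
        rw [ho, if_neg (by simpa [hci] using hm)]
      rw [ho']
      unfold pvStepB
      dsimp only
      rw [← hci, hins_eq (hcond.mpr hm)]
  -- j' is not among the remaining cells
  have hjrem : ((j' : Nat) : Int) ∉ rem.map (fun v => PySem.Int.mod v (N : Int)) := by
    rcases hchar j' hj'N with h0 | h1
    · rw [hdegj] at h0; omega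
    · rw [hdegj] at h1
      have : ((i :: rem).map (fun v => PySem.Int.mod v (N : Int))).count ((j' : Nat) : Int)
          = 0 := by omega
      have hnm := List.count_eq_zero.mp this
      rw [List.map_cons] at hnm
      exact fun hm => hnm (List.mem_cons_of_mem _ hm)
  -- the invariant survives
  have hzeq : (Finset.range N).filter (fun x => deg2.getD x 0 = 0)
      = insert j' ((Finset.range N).filter (fun x => deg.getD x 0 = 0)) := by
    ext x
    simp only [Finset.mem_filter, Finset.mem_insert, Finset.mem_range]
    constructor
    · rintro ⟨hxN, h0⟩
      rw [hd2 x] at h0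
      by_cases hxj : x = j'
      · exact Or.inl hxj
      · rw [if_neg hxj] at h0
        by_cases hxi : x = ci
        · rw [if_pos hxi] at h0; omega
        · rw [if_neg hxi] at h0; exact Or.inr ⟨hxN, h0⟩
    · rintro (rfl | ⟨hxN, h0⟩)
      · exact ⟨hj'N, by rw [hd2 x, if_pos rfl]⟩
      · have hxj : x ≠ j' := by intro h; rw [h, hdegj] at h0; omega
        have hxi : x ≠ ci := by intro h; rw [h] at h0; omega
        exact ⟨hxN, by rw [hd2 x, if_neg hxj, if_neg hxi]; exact h0⟩
  have hjnz : j' ∉ (Finset.range N).filter (fun x => deg.getD x 0 = 0) := by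
    simp only [Finset.mem_filter, Finset.mem_range]
    rintro ⟨-, h0⟩; rw [hdegj] at h0; omega
  have hinv2 : PvInv N (rem.map (fun v => PySem.Int.mod v (N : Int))) deg2 := by
    refine ⟨hlenn2, ?_, ?_, ?_⟩
    · intro x hxN
      rw [hd2 x]
      by_cases hxj : x = j'
      · rw [if_pos hxj]; exact Or.inl rfl
      · rw [if_neg hxj]
        by_cases hxi : x = ci
        · rw [if_pos hxi, hxi, hdi, hcnti]
          right; push_cast; ring
        · rw [if_neg hxi]
          rcases hchar x hxN with h0 | h1
          · exact Or.inl h0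
          · rw [hcntne x hxi] at h1; exact Or.inr h1
    · intro x hxN h0
      rw [hd2 x] at h0
      by_cases hxj : x = j'
      · rw [hxj]; exact hjrem
      · rw [if_neg hxj] at h0
        by_cases hxi : x = ci
        · rw [if_pos hxi] at h0; omega
        · rw [if_neg hxi] at h0
          intro hm
          exact hzero x hxN h0 (by rw [List.map_cons]; exact List.mem_cons_of_mem _ hm)
    · rw [hzeq, Finset.card_insert_of_notMem hjnz]
      rw [hmlen] at hcard
      simp only [List.length_map]
      omega
  have hk2 : k + 1 = ((Finset.range N).filter (fun x => deg2.getD x 0 = 0)).card := by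
    rw [hzeq, Finset.card_insert_of_notMem hjnz, ← hk]
  -- the zero-cell characterisation (for the D_ layer)
  have hzc : deg2.getD 0 0 = 1 ↔ (PySem.Int.mod i (N : Int) = 0 ∧
      ((0 : Nat) : Int) ∉ rem.map (fun v => PySem.Int.mod v (N : Int))) := by
    have hciz : PySem.Int.mod i (N : Int) = 0 ↔ ci = 0 := by
      rw [← hci]; omega
    rw [hd2 0, hciz]
    by_cases hj0 : (0 : Nat) = j'
    · rw [if_pos hj0]
      constructor
      · intro h; omega
      · rintro ⟨hc0, h0r⟩
        exfalso
        rw [← hj0] at hdegj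
        rcases hchar 0 (by omega) with h0 | h1
        · rw [hdegj] at h0; omega
        · rw [hdegj] at h1
          have : ((i :: rem).map (fun v => PySem.Int.mod v (N : Int))).count ((0 : Nat) : Int)
              = 0 := by omega
          have hnm := List.count_eq_zero.mp this
          have : ((ci : Nat) : Int) = ((0 : Nat) : Int) := by omega
          rw [this] at hmemi
          exact hnm hmemi
    · rw [if_neg hj0]
      by_cases hc0 : (0 : Nat) = ci
      · rw [if_pos hc0]
        have hdeq : deg.getD ci 0
            = 2 + (rem.map (fun v => PySem.Int.mod v (N : Int))).count ((ci : Nat) : Int) := by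
          rw [hdi, hcnti]; push_cast; ring
        rw [← hc0] at hdeq
        rw [← hc0, hdeq]
        constructor
        · intro h
          have hcz : (rem.map (fun v => PySem.Int.mod v (N : Int))).count ((0 : Nat) : Int)
              = 0 := by omega
          exact ⟨by omega, List.count_eq_zero.mp hcz⟩
        · rintro ⟨-, h0r⟩
          have := List.count_eq_zero.mpr h0r
          omega
      · rw [if_neg hc0]
        constructor
        · intro h
          exfalso
          have := find_zero N deg hN0 h
          rw [hfind] at this
          exact hj0 (by injection this with h'; omega)
        · rintro ⟨hc, -⟩
          exfalso
          exact hc0 (by omega)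
  exact ⟨j', rest, deg2, hj'N, rfl, hA, hB, hinv2, hk2, hzc⟩

-- the whole-loop simulation
lemma pvLoop_sim (N : Nat) :
    ∀ (rem : List Int) (nls : List (Option Int)) (TB : List (List Int)) (k : Nat)
      (deg : List Int),
      (∀ x ∈ rem, -(N : Int) ≤ x ∧ x < (N : Int)) →
      PvNL N rem nls →
      PvInv N (rem.map (fun v => PySem.Int.mod v (N : Int))) deg →
      k = ((Finset.range N).filter (fun x => deg.getD x 0 = 0)).card →
      TB.length = k →
      ∃ (TB2 : List (List Int)) (deg2 : List Int),
        rem.foldl (pvStepA N) (TB ++ List.replicate (N - 1 - k) [], k, deg)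
          = (TB2 ++ List.replicate (N - 1 - (k + rem.length)) [], k + rem.length, deg2) ∧
        (rem.zip nls).foldl pvStepB (TB, pvLeafList N deg) = (TB2, pvLeafList N deg2) ∧
        TB2.length = k + rem.length ∧
        PvInv N [] deg2 ∧
        (rem = [] → deg2 = deg) ∧
        (∀ z, (rem.map (fun v => PySem.Int.mod v (N : Int))).getLast? = some z →
          (deg2.getD 0 0 = 1 ↔ z = 0)) := by
  intro rem
  induction rem with
  | nil =>
    intro nls TB k deg _ _ hinv _ hTB
    exact ⟨TB, deg, by simp, rfl, by simp [hTB], by simpa using hinv,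
      fun _ => rfl, by intro z hz; simp at hz⟩
  | cons i rem ih =>
    intro nls TB k deg hdom hnl hinv hk hTB
    obtain ⟨o, os, rfl, ho, hnl'⟩ := hnl
    obtain ⟨hi0, hiN⟩ := hdom i (List.mem_cons_self)
    obtain ⟨j', rest, deg2, hj'N, hL, hA, hB, hinv2, hk2, hzc⟩ :=
      pvStep_sim N i o rem deg TB k hi0 hiN hinv ho hk hTB
    have hlen' : k + (i :: rem).length = (k + 1) + rem.length := by
      simp only [List.length_cons]; omega
    rw [List.zip_cons_cons, List.foldl_cons, List.foldl_cons, hA, hB, hlen']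
    obtain ⟨TB2, deg3, h1, h2, h3, h4, h5, h6⟩ :=
      ih os (TB ++ [[i, (j' : Int)]]) (k + 1) deg2
        (fun x hx => hdom x (List.mem_cons_of_mem _ hx)) hnl' hinv2 hk2 (by simp [hTB])
    refine ⟨TB2, deg3, by rw [← h1], h2, by omega, h4, ?_, ?_⟩
    · intro h; exact absurd h (List.cons_ne_nil _ _)
    · intro z hz
      cases rem with
      | nil =>
        have hz' : PySem.Int.mod i (N : Int) = z := by
          simpa using hz
        rw [h5 rfl, hzc]
        constructor
        · rintro ⟨hc, -⟩; omega
        · intro h; exact ⟨by omega, by simp⟩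
      | cons r rs =>
        refine h6 z ?_
        rw [List.map_cons, List.map_cons] at hz
        rw [List.map_cons, ← List.getLast?_cons_cons (a := PySem.Int.mod i (N : Int))]
        exact hz

-- the initial degree table
lemma pvDegInit_aux_len (seq : List Int) :
    ∀ deg : List Int,
      (seq.foldl (fun deg i => PySem.List.pySetD deg i (PySem.List.pyGetD deg i 0 + 1)) deg).length
        = deg.length := by
  induction seq with
  | nil => intro deg; rfl
  | cons i seq ih =>
    intro deg
    rw [List.foldl_cons, ih]
    exact PySem.List.length_pySetD _ _ _

lemma pvDegInit_len (N : Nat) (seq : List Int) : (pvDegInit N seq).length = N := by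
  unfold pvDegInit
  rw [pvDegInit_aux_len]
  exact List.length_replicate

lemma pvDegInit_aux_getD (N : Nat) (x : Nat) (_hx : x < N) :
    ∀ (seq : List Int) (deg : List Int), deg.length = N →
      (∀ i ∈ seq, -(N : Int) ≤ i ∧ i < (N : Int)) →
      (seq.foldl (fun deg i => PySem.List.pySetD deg i (PySem.List.pyGetD deg i 0 + 1)) deg).getD x 0
        = deg.getD x 0 + (seq.map (fun v => PySem.Int.mod v (N : Int))).count (x : Int) := by
  intro seq
  induction seq with
  | nil => intro deg _ _; simp
  | cons i seq ih =>
    intro deg hlen hdom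
    obtain ⟨hi0, hiN⟩ := hdom i (List.mem_cons_self)
    have hN0 : 0 < N := by omega
    have hm0 : 0 ≤ PySem.Int.mod i (N : Int) := PySem.Int.mod_nonneg i (by exact_mod_cast hN0)
    have hmN : PySem.Int.mod i (N : Int) < (N : Int) := PySem.Int.mod_lt i (by exact_mod_cast hN0)
    have hiL : (PySem.Int.mod i (N : Int)).toNat < deg.length := by omega
    rw [List.foldl_cons]
    have hset : PySem.List.pySetD deg i (PySem.List.pyGetD deg i 0 + 1)
        = deg.set ((PySem.Int.mod i (N : Int)).toNat)
            (deg.getD ((PySem.Int.mod i (N : Int)).toNat) 0 + 1) := by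
      rw [pySetD_mod deg N i _ hlen hi0 hiN hN0, pyGetD_mod deg N i hlen hi0 hiN hN0]
    rw [hset, ih _ (by simp [hlen]) (fun y hy => hdom y (List.mem_cons_of_mem _ hy))]
    rw [getD_set_lt deg _ x _ _ hiL, List.map_cons, List.count_cons]
    by_cases hxi : x = (PySem.Int.mod i (N : Int)).toNat
    · rw [if_pos hxi, if_pos (by simp [beq_iff_eq]; omega)]
      rw [hxi]
      push_cast
      ring
    · rw [if_neg hxi, if_neg (by simp [beq_iff_eq]; omega)]
      push_cast
      ring

lemma pvDegInit_getD (N : Nat) (seq : List Int)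
    (h : ∀ i ∈ seq, -(N : Int) ≤ i ∧ i < (N : Int)) (x : Nat) :
    (pvDegInit N seq).getD x 0
      = if x < N then 1 + (seq.map (fun v => PySem.Int.mod v (N : Int))).count (x : Int)
        else 0 := by
  by_cases hx : x < N
  · rw [if_pos hx]
    unfold pvDegInit
    rw [pvDegInit_aux_getD N x hx seq _ (by simp) h]
    rw [List.getD_eq_getElem _ 0 (by simp [hx] : x < (List.replicate N (1:Int)).length)]
    simp [List.getElem_replicate]
  · rw [if_neg hx]
    exact List.getD_eq_default _ _ (by rw [pvDegInit_len]; omega)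

-- last-occurrence index of a value in a list (counted from the front) ----------

def pvLastIdx (c : Int) : List Int → Nat
  | [] => 0
  | x :: xs => if c ∈ xs then pvLastIdx c xs + 1 else 0

lemma pvLastIdx_lt {c : Int} : ∀ {m : List Int}, c ∈ m → pvLastIdx c m < m.length := by
  intro m
  induction m with
  | nil => intro h; simp at h
  | cons x xs ih =>
    intro h
    by_cases hm : c ∈ xs
    · rw [pvLastIdx, if_pos hm]
      simpa using ih hm
    · rw [pvLastIdx, if_neg hm]
      simp

lemma pvLastIdx_get {c : Int} : ∀ {m : List Int}, c ∈ m →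
    m[pvLastIdx c m]? = some c := by
  intro m
  induction m with
  | nil => intro h; simp at h
  | cons x xs ih =>
    intro h
    by_cases hm : c ∈ xs
    · rw [pvLastIdx, if_pos hm]
      simpa using ih hm
    · rw [pvLastIdx, if_neg hm]
      rcases List.mem_cons.mp h with rfl | hh
      · rfl
      · exact absurd hh hm

lemma pvLastIdx_nomem {c : Int} : ∀ {m : List Int}, c ∈ m →
    c ∉ m.drop (pvLastIdx c m + 1) := by
  intro m
  induction m with
  | nil => intro h; simp at h
  | cons x xs ih =>
    intro h
    by_cases hm : c ∈ xs
    · rw [pvLastIdx, if_pos hm]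
      simpa using ih hm
    · rw [pvLastIdx, if_neg hm]
      simpa using hm

lemma pvLastIdx_unique {c : Int} : ∀ {m : List Int} (t : Nat),
    m[t]? = some c → c ∉ m.drop (t + 1) → t = pvLastIdx c m := by
  intro m
  induction m with
  | nil => intro t h _; simp at h
  | cons x xs ih =>
    intro t h hnd
    cases t with
    | zero =>
      simp only [List.getElem?_cons_zero, Option.some.injEq] at h
      simp only [List.drop_succ_cons, List.drop_zero] at hnd
      rw [pvLastIdx, if_neg hnd]
    | succ t =>
      simp only [List.getElem?_cons_succ] at h
      simp only [List.drop_succ_cons] at hnd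
      have hm : c ∈ xs := by
        have := List.getElem?_eq_some_iff.mp h
        obtain ⟨hlt, heq⟩ := this
        exact heq ▸ List.getElem_mem hlt
      rw [pvLastIdx, if_pos hm, ← ih t h hnd]

-- the last_ref table ----------------------------------------------------------

lemma pvLastRef_fold (N : Nat) (hN : 0 < N) :
    ∀ (l : List Int) (s : Nat) (L : List (Option Int)), L.length = N →
      (∀ x ∈ l, -(N : Int) ≤ x ∧ x < (N : Int)) →
      ∀ c : Nat, c < N →
      ((PySem.List.enumerate l (s : Int)).foldl
          (fun tb p => PySem.List.pySetD tb p.2 (some p.1)) L).getD c none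
        = if ((c : Nat) : Int) ∈ l.map (fun v => PySem.Int.mod v (N : Int))
          then some (((s + pvLastIdx (c : Int) (l.map (fun v => PySem.Int.mod v (N : Int)))
              : Nat)) : Int)
          else L.getD c none := by
  intro l
  induction l with
  | nil =>
    intro s L _ _ c _
    simp [PySem.List.enumerate_nil]
  | cons x xs ih =>
    intro s L hL hdom c hc
    obtain ⟨hx0, hxN⟩ := hdom x (List.mem_cons_self)
    have hm0 : 0 ≤ PySem.Int.mod x (N : Int) := PySem.Int.mod_nonneg x (by exact_mod_cast hN)
    have hmN : PySem.Int.mod x (N : Int) < (N : Int) := PySem.Int.mod_lt x (by exact_mod_cast hN)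
    rw [PySem.List.enumerate_cons, List.foldl_cons]
    have hsucc : (s : Int) + 1 = (((s + 1 : Nat)) : Int) := by push_cast; ring
    set L' := PySem.List.pySetD L x (some (s : Int)) with hL'
    have hL'len : L'.length = N := by
      rw [hL', PySem.List.length_pySetD, hL]
    have hL'get : L'.getD c none
        = if c = (PySem.Int.mod x (N : Int)).toNat then some ((s : Nat) : Int)
          else L.getD c none := by
      rw [hL', pySetD_mod L N x _ hL hx0 hxN hN,
        getD_set_lt L _ c _ _ (by omega)]
    rw [hsucc, ih (s + 1) L' hL'len (fun y hy => hdom y (List.mem_cons_of_mem _ hy)) c hc]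
    rw [List.map_cons]
    by_cases hmem : ((c : Nat) : Int) ∈ xs.map (fun v => PySem.Int.mod v (N : Int))
    · rw [if_pos hmem, if_pos (List.mem_cons_of_mem _ hmem),
        pvLastIdx, if_pos hmem]
      congr 1
      push_cast
      ring
    · rw [if_neg hmem, hL'get]
      by_cases hcx : c = (PySem.Int.mod x (N : Int)).toNat
      · rw [if_pos hcx,
          if_pos (by rw [List.mem_cons]; left; omega),
          pvLastIdx, if_neg hmem]
        simp
      · rw [if_neg hcx, if_neg ?_]
        rw [List.mem_cons]
        rintro (h | h)
        · exact hcx (by omega)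
        · exact hmem h

lemma pvLastRef_getD (N : Nat) (hN : 0 < N) (seq : List Int)
    (hdom : ∀ x ∈ seq, -(N : Int) ≤ x ∧ x < (N : Int)) (c : Nat) (hc : c < N) :
    (pvLastRef N seq).getD c none
      = if ((c : Nat) : Int) ∈ seq.map (fun v => PySem.Int.mod v (N : Int))
        then some ((pvLastIdx (c : Int) (seq.map (fun v => PySem.Int.mod v (N : Int))) : Nat) : Int)
        else none := by
  unfold pvLastRef
  have h0 : ((0 : Nat) : Int) = (0 : Int) := rfl
  rw [← h0, pvLastRef_fold N hN seq 0 _ (by simp) hdom c hc]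
  rw [List.getD_eq_getElem _ _ (by simpa using hc)]
  simp

-- the new_leaf table ----------------------------------------------------------

lemma pvNewLeaf_fold (m : List Int) (t : Nat) (ct : Int)
    (hct : m[t]? = some ct) (hct0 : 0 ≤ ct) (tb : List (Option Int)) :
    ∀ (cs : List Nat) (nl : List (Option Int)), nl.length = m.length →
      (∀ c ∈ cs, tb.getD c none
        = if ((c : Nat) : Int) ∈ m then some ((pvLastIdx (c : Int) m : Nat) : Int) else none) →
      ((cs.foldl (fun nl c =>
          match tb.getD c none with
          | some s => PySem.List.pySetD nl s (some (c : Int))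
          | none => nl) nl).getD t none)
        = if (ct.toNat ∈ cs ∧ ct ∉ m.drop (t + 1)) then some ct else nl.getD t none := by
  have htlt : t < m.length := (List.getElem?_eq_some_iff.mp hct).1
  have hctm : ct ∈ m := by
    obtain ⟨hlt, heq⟩ := List.getElem?_eq_some_iff.mp hct
    exact heq ▸ List.getElem_mem hlt
  intro cs
  induction cs with
  | nil =>
    intro nl hlen _
    rw [if_neg (by simp)]
    rfl
  | cons c cs' ih =>
    intro nl hlen htb
    rw [List.foldl_cons]
    have htbc := htb c List.mem_cons_self
    by_cases hcm : ((c : Nat) : Int) ∈ m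
    · rw [if_pos hcm] at htbc
      have hli := pvLastIdx_lt (c := ((c : Nat) : Int)) hcm
      have hstep : (match tb.getD c none with
          | some s => PySem.List.pySetD nl s (some (c : Int))
          | none => nl)
          = nl.set (pvLastIdx ((c : Nat) : Int) m) (some ((c : Nat) : Int)) := by
        rw [htbc]
        dsimp only
        rw [PySem.List.pySetD_of_nonneg _ _ (by positivity)]
        simp
      rw [hstep]
      rw [ih _ (by simp [hlen]) (fun c' hc' => htb c' (List.mem_cons_of_mem _ hc'))]
      by_cases hdone : ct.toNat ∈ cs' ∧ ct ∉ m.drop (t + 1)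
      · rw [if_pos hdone, if_pos ⟨List.mem_cons_of_mem _ hdone.1, hdone.2⟩]
      · rw [if_neg hdone]
        rw [getD_set_lt nl _ t _ _ (by omega)]
        by_cases hwt : t = pvLastIdx ((c : Nat) : Int) m
        · -- the write lands on t: then c's cell is ct and ct leaves drop(t+1)
          have hgt : m[t]? = some ((c : Nat) : Int) := by
            rw [hwt]; exact pvLastIdx_get hcm
          have hcct : ((c : Nat) : Int) = ct := by
            rw [hgt] at hct; injection hct
          have hnd : ct ∉ m.drop (t + 1) := by
            rw [← hcct, hwt]; exact pvLastIdx_nomem hcm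
          rw [if_pos hwt, if_pos ⟨by rw [List.mem_cons]; left; omega, hnd⟩, hcct]
        · rw [if_neg hwt]
          by_cases hgoal : ct.toNat ∈ c :: cs' ∧ ct ∉ m.drop (t + 1)
          · exfalso
            obtain ⟨hmem, hnd⟩ := hgoal
            rcases List.mem_cons.mp hmem with hh | hh
            · -- c is ct's cell: its last index is t, contradicting hwt
              have hceq : ((c : Nat) : Int) = ct := by omega
              apply hwt
              rw [hceq]
              exact pvLastIdx_unique t hct hnd
            · exact hdone ⟨hh, hnd⟩
          · rw [if_neg hgoal]
    · rw [if_neg hcm] at htbc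
      have hstep : (match tb.getD c none with
          | some s => PySem.List.pySetD nl s (some (c : Int))
          | none => nl) = nl := by rw [htbc]
      rw [hstep, ih nl hlen (fun c' hc' => htb c' (List.mem_cons_of_mem _ hc'))]
      by_cases hdone : ct.toNat ∈ cs' ∧ ct ∉ m.drop (t + 1)
      · rw [if_pos hdone, if_pos ⟨List.mem_cons_of_mem _ hdone.1, hdone.2⟩]
      · rw [if_neg hdone, if_neg ?_]
        rintro ⟨hmem, hnd⟩
        rcases List.mem_cons.mp hmem with hh | hh
        · exact hcm (by rw [show ((c:Nat):Int) = ct by omega]; exact hctm)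
        · exact hdone ⟨hh, hnd⟩

-- PvNL from an entrywise description ------------------------------------------

lemma pvNL_of_getD (N : Nat) :
    ∀ (l : List Int) (nls : List (Option Int)), nls.length = l.length →
      (∀ (t : Nat) (ct : Int),
        (l.map (fun v => PySem.Int.mod v (N : Int)))[t]? = some ct →
        nls.getD t none
          = if ct ∈ (l.map (fun v => PySem.Int.mod v (N : Int))).drop (t + 1)
            then none else some ct) →
      PvNL N l nls := by
  intro l
  induction l with
  | nil =>
    intro nls hlen _
    exact List.eq_nil_of_length_eq_zero (by simpa using hlen)
  | cons x xs ih =>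
    intro nls hlen hget
    rcases nls with _ | ⟨o, os⟩
    · simp at hlen
    refine ⟨o, os, rfl, ?_, ?_⟩
    · have h0 := hget 0 (PySem.Int.mod x (N : Int)) (by simp)
      simpa using h0
    · refine ih os (by simpa using hlen) (fun t ct hct => ?_)
      have h1 := hget (t + 1) ct (by simpa using hct)
      simpa using h1

lemma pvNewLeaf_PvNL (N : Nat) (hN : 0 < N) (seq : List Int)
    (hdom : ∀ x ∈ seq, -(N : Int) ≤ x ∧ x < (N : Int)) :
    PvNL N seq (pvNewLeaf N seq (pvLastRef N seq)) := by
  set m := seq.map (fun v => PySem.Int.mod v (N : Int)) with hm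
  have hmlen : m.length = seq.length := by simp [hm]
  refine pvNL_of_getD N seq _ ?_ ?_
  · unfold pvNewLeaf
    have : ∀ (cs : List Nat) (nl : List (Option Int)),
        (cs.foldl (fun nl c =>
          match (pvLastRef N seq).getD c none with
          | some t => PySem.List.pySetD nl t (some (c : Int))
          | none => nl) nl).length = nl.length := by
      intro cs
      induction cs with
      | nil => intro nl; rfl
      | cons c cs' ih =>
        intro nl
        rw [List.foldl_cons, ih]
        cases h : (pvLastRef N seq).getD c none with
        | none => rfl
        | some t => exact PySem.List.length_pySetD _ _ _
    rw [this, List.length_replicate]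
  · intro t ct hct
    rw [← hm] at hct ⊢
    have hctm : ct ∈ m := by
      obtain ⟨hlt, heq⟩ := List.getElem?_eq_some_iff.mp hct
      exact heq ▸ List.getElem_mem hlt
    obtain ⟨v, -, hv⟩ := List.mem_map.mp (hm ▸ hctm)
    have hct0 : 0 ≤ ct := hv ▸ PySem.Int.mod_nonneg _ (by exact_mod_cast hN)
    have hctN : ct < (N : Int) := hv ▸ PySem.Int.mod_lt _ (by exact_mod_cast hN)
    unfold pvNewLeaf
    rw [pvNewLeaf_fold m t ct hct hct0 (pvLastRef N seq) (List.range N) _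
      (by simp [hmlen])
      (fun c hc => by
        rw [pvLastRef_getD N hN seq hdom c (List.mem_range.mp hc), hm])]
    have hmemrange : ct.toNat ∈ List.range N := List.mem_range.mpr (by omega)
    by_cases hdrop : ct ∈ m.drop (t + 1)
    · rw [if_neg (by rintro ⟨-, h⟩; exact h hdrop), if_pos hdrop]
      have htlt : t < m.length := (List.getElem?_eq_some_iff.mp hct).1
      rw [List.getD_eq_getElem _ _ (by
        simp only [List.length_replicate]
        omega)]
      simp
    · rw [if_pos ⟨hmemrange, hdrop⟩, if_neg hdrop]

-- the initial leaf list B computes --------------------------------------------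

lemma pvLeaves0_eq (N : Nat) (hN : 0 < N) (seq : List Int)
    (hdom : ∀ x ∈ seq, -(N : Int) ≤ x ∧ x < (N : Int)) :
    pvLeaves0 N (pvLastRef N seq) = pvLeafList N (pvDegInit N seq) := by
  unfold pvLeaves0 pvLeafList
  congr 1
  refine List.filter_congr (fun c hc => ?_)
  have hcN := List.mem_range.mp hc
  rw [pvLastRef_getD N hN seq hdom c hcN,
    pvDegInit_getD N seq hdom c, if_pos hcN]
  by_cases hm : ((c : Nat) : Int) ∈ seq.map (fun v => PySem.Int.mod v (N : Int))
  · rw [if_pos hm]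
    have := List.count_pos_iff.mpr hm
    have h1 : ¬ (1 + ((seq.map (fun v => PySem.Int.mod v (N : Int))).count ((c : Nat) : Int) : Int)
        = 1) := by omega
    simp [h1]
  · rw [if_neg hm, List.count_eq_zero_of_not_mem hm]
    simp

-- A's final u/v scan, characterised through the filtered leaf list ------------

lemma pvUV_nil (deg : List Int) :
    ∀ (l : List Nat) (uv : Int × Int),
      l.filter (fun j => deg.getD j 0 == 1) = [] → pvUV l deg uv = uv := by
  intro l
  induction l with
  | nil => intro uv _; rfl
  | cons x xs ih =>
    intro uv hf
    rw [List.filter_cons] at hf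
    cases hx : (deg.getD x 0 == 1) with
    | true => rw [if_pos hx] at hf; exact absurd hf (List.cons_ne_nil _ _)
    | false =>
      rw [if_neg (by simpa using hx)] at hf
      rw [pvUV, if_neg (by simpa using hx)]
      exact ih uv hf

lemma pvUV_snd (deg : List Int) :
    ∀ (l : List Nat) (b : Nat) (bs : List Nat) (u v : Int), u ≠ 0 →
      l.filter (fun j => deg.getD j 0 == 1) = b :: bs →
      pvUV l deg (u, v) = (u, (b : Int)) := by
  intro l
  induction l with
  | nil => intro b bs u v _ hf; simp at hf
  | cons x xs ih =>
    intro b bs u v hu hf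
    rw [List.filter_cons] at hf
    cases hx : (deg.getD x 0 == 1) with
    | true =>
      rw [if_pos hx] at hf
      have hxb : x = b := ((List.cons.injEq _ _ _ _).mp hf).1
      subst hxb
      rw [pvUV, if_pos hx, if_neg (by simpa using hu)]
    | false =>
      rw [if_neg (by simpa using hx)] at hf
      rw [pvUV, if_neg (by simpa using hx)]
      exact ih b bs u v hu hf

lemma pvUV_single (deg : List Int) :
    ∀ (l : List Nat) (b : Nat) (v : Int),
      l.filter (fun j => deg.getD j 0 == 1) = [b] →
      pvUV l deg (0, v) = ((b : Int), v) := by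
  intro l
  induction l with
  | nil => intro b v hf; simp at hf
  | cons x xs ih =>
    intro b v hf
    rw [List.filter_cons] at hf
    cases hx : (deg.getD x 0 == 1) with
    | true =>
      rw [if_pos hx] at hf
      obtain ⟨hxb, hnil⟩ := (List.cons.injEq _ _ _ _).mp hf
      subst hxb
      rw [pvUV, if_pos hx, if_pos (by simp)]
      exact pvUV_nil deg xs _ hnil
    | false =>
      rw [if_neg (by simpa using hx)] at hf
      rw [pvUV, if_neg (by simpa using hx)]
      exact ih b v hf

lemma pvUV_two (deg : List Int) :
    ∀ (l : List Nat) (a b : Nat),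
      l.filter (fun j => deg.getD j 0 == 1) = [a, b] →
      pvUV l deg (0, 0) = if a = 0 then ((b : Int), 0) else ((a : Int), (b : Int)) := by
  intro l
  induction l with
  | nil => intro a b hf; simp at hf
  | cons x xs ih =>
    intro a b hf
    rw [List.filter_cons] at hf
    cases hx : (deg.getD x 0 == 1) with
    | true =>
      rw [if_pos hx] at hf
      obtain ⟨hxa, hxs⟩ := (List.cons.injEq _ _ _ _).mp hf
      subst x
      rw [pvUV, if_pos hx, if_pos (by simp)]
      by_cases ha : a = 0
      · subst ha
        rw [if_pos rfl]
        simpa using pvUV_single deg xs b 0 hxs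
      · rw [if_neg ha]
        exact pvUV_snd deg xs b [] (a : Int) 0 (by exact_mod_cast ha) hxs
    | false =>
      rw [if_neg (by simpa using hx)] at hf
      rw [pvUV, if_neg (by simpa using hx)]
      exact ih a b hf

-- orientation enumeration -----------------------------------------------------

-- A's yielded row for a given bitmask I
def pvRow (T : List (List Int)) (I : Nat) : List (Int × Int) :=
  (PySem.List.enumerate T).map (fun p =>
    if (I >>> p.1.toNat) &&& 1 == 1 then (p.2.getD 0 0, p.2.getD 1 0)
    else (p.2.getD 1 0, p.2.getD 0 0))

lemma pvRow_shift (T : List (List Int)) :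
    ∀ (s I : Nat),
      (PySem.List.enumerate T ((s : Int) + 1)).map (fun p =>
          if (I >>> p.1.toNat) &&& 1 == 1 then (p.2.getD 0 0, p.2.getD 1 0)
          else (p.2.getD 1 0, p.2.getD 0 0))
        = (PySem.List.enumerate T (s : Int)).map (fun p =>
          if ((I >>> 1) >>> p.1.toNat) &&& 1 == 1 then (p.2.getD 0 0, p.2.getD 1 0)
          else (p.2.getD 1 0, p.2.getD 0 0)) := by
  induction T with
  | nil => intro s I; simp [PySem.List.enumerate_nil]
  | cons x xs ih =>
    intro s I
    rw [PySem.List.enumerate_cons, PySem.List.enumerate_cons, List.map_cons, List.map_cons]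
    congr 1
    · have h1 : ((s : Int) + 1).toNat = s + 1 := by omega
      have h2 : ((s : Int)).toNat = s := by omega
      rw [h1, h2, Nat.add_comm s 1, Nat.shiftRight_add]
    · have h3 : (s : Int) + 1 + 1 = (((s + 1 : Nat)) : Int) + 1 := by push_cast; ring
      have h4 : (s : Int) + 1 = (((s + 1 : Nat)) : Int) := by push_cast; ring
      rw [h3, h4, ih (s + 1) I]

lemma pvRow_cons (e : List Int) (rest : List (List Int)) (I : Nat) :
    pvRow (e :: rest) I
      = (if I &&& 1 == 1 then (e.getD 0 0, e.getD 1 0) else (e.getD 1 0, e.getD 0 0))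
        :: pvRow rest (I >>> 1) := by
  unfold pvRow
  rw [PySem.List.enumerate_cons, List.map_cons]
  congr 1
  have := pvRow_shift rest 0 I
  simpa using this

lemma pvRangeTwoMul {α : Type} (h : Nat → α) (n : Nat) :
    (List.range (2 * n)).map h
      = (List.range n).flatMap (fun q => [h (2 * q), h (2 * q + 1)]) := by
  induction n with
  | zero => simp
  | succ n ih =>
    have h2 : 2 * (n + 1) = (2 * n + 1) + 1 := by omega
    rw [h2, List.range_succ, List.range_succ, List.range_succ]
    simp only [List.map_append, List.flatMap_append, ih]
    simp

lemma pvOrients_cons (e : List Int) (rest : List (List Int)) :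
    pvOrients (e :: rest)
      = (pvOrients rest).flatMap
          (fun r => [(e.getD 1 0, e.getD 0 0) :: r, (e.getD 0 0, e.getD 1 0) :: r]) := by
  show (pvOrients rest).foldl _ [] = _
  rw [PySem.List.foldl_append_eq_flatMap]
  simp

lemma pvOrient_eq : ∀ (T : List (List Int)),
    (List.range (2 ^ T.length)).map (pvRow T) = pvOrients T := by
  intro T
  induction T with
  | nil => simp [pvOrients, pvRow]
  | cons e rest ih =>
    have h2 : 2 ^ (e :: rest).length = 2 * 2 ^ rest.length := by
      simp [pow_succ]; ring
    rw [h2, pvRangeTwoMul, pvOrients_cons, ← ih, List.flatMap_map]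
    refine List.flatMap_congr (fun q _ => ?_)
    rw [pvRow_cons, pvRow_cons]
    have e1 : (2 * q) &&& 1 = 0 := by rw [Nat.and_one_is_mod]; omega
    have e2 : (2 * q + 1) &&& 1 = 1 := by
      rw [Nat.and_one_is_mod]; omega
    have e3 : (2 * q) >>> 1 = q := by
      rw [Nat.shiftRight_succ, Nat.shiftRight_zero]; omega
    have e4 : (2 * q + 1) >>> 1 = q := by
      rw [Nat.shiftRight_succ, Nat.shiftRight_zero]; omega
    rw [e1, e2, e3, e4]
    simp

lemma pvOrients_head? : ∀ (T : List (List Int)),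
    (pvOrients T).head? = some (T.map (fun e => (e.getD 1 0, e.getD 0 0))) := by
  intro T
  induction T with
  | nil => rfl
  | cons e rest ih =>
    obtain ⟨R, tail, hR⟩ : ∃ R tail, pvOrients rest = R :: tail := by
      cases h : pvOrients rest with
      | nil => rw [h] at ih; simp at ih
      | cons R t => exact ⟨R, t, rfl⟩
    rw [pvOrients_cons, hR]
    rw [hR] at ih
    simp only [List.head?_cons, Option.some.injEq] at ih
    simp [List.flatMap_cons, ih]

-- exactly two leaves at the end -----------------------------------------------

lemma pvFinal_two (N : Nat) (deg : List Int) (hinv : PvInv N [] deg) :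
    ∃ a b : Nat, a < b ∧ b < N ∧ pvLeafList N deg = [(a : Int), (b : Int)] := by
  obtain ⟨hlen, hchar, hzero, hcard⟩ := hinv
  have hnot : (Finset.range N).filter (fun x => ¬ deg.getD x 0 = 0)
      = (Finset.range N).filter (fun x => deg.getD x 0 = 1) := by
    refine Finset.filter_congr (fun x hx => ?_)
    rcases hchar x (Finset.mem_range.mp hx) with h0 | h1
    · rw [h0]; simp
    · simp only [List.count_nil, Int.natCast_zero, add_zero] at h1
      rw [h1]; simp
  have hsum := Finset.card_filter_add_card_filter_not (s := Finset.range N)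
    (fun x => deg.getD x 0 = 0)
  rw [hnot] at hsum
  have hc1 : ((Finset.range N).filter (fun x => deg.getD x 0 = 1)).card = 2 := by
    rw [Finset.card_range] at hsum
    simp only [List.length_nil] at hcard
    omega
  have hfl : ((Finset.range N).filter (fun x => deg.getD x 0 = 1)).card
      = ((List.range N).filter (fun j => deg.getD j 0 == 1)).length := by
    rw [finset_filter_range_card]
    congr 1
  have hlen2 : (pvLeafList N deg).length = 2 := by
    unfold pvLeafList
    rw [List.length_map, ← hfl, hc1]
  have hpw := pairwise_pvLeafList N deg
  rcases hL : pvLeafList N deg with _ | ⟨y1, _ | ⟨y2, _ | ⟨y3, tl⟩⟩⟩ <;>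
    rw [hL] at hlen2 <;> try simp at hlen2
  obtain ⟨a, haN, rfl, -⟩ := (mem_pvLeafList N deg y1).mp (by rw [hL]; simp)
  obtain ⟨b, hbN, rfl, -⟩ := (mem_pvLeafList N deg y2).mp (by rw [hL]; simp)
  rw [hL] at hpw
  have hab : (a : Int) < (b : Int) := by
    rcases List.pairwise_cons.mp hpw with ⟨h1, -⟩
    exact h1 _ (by simp)
  exact ⟨a, b, by exact_mod_cast hab, hbN, rfl⟩

lemma pvOrient_eq' (T : List (List Int)) (m : Nat) (hm : T.length = m) :
    (List.range (2 ^ m)).map (fun I => (PySem.List.enumerate T).map (fun p =>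
        if (I >>> p.1.toNat) &&& 1 == 1 then (p.2.getD 0 0, p.2.getD 1 0)
        else (p.2.getD 1 0, p.2.getD 0 0))) = pvOrients T := by
  subst hm
  exact pvOrient_eq T

-- the master lemma: both ports' outputs, the final leaves, and the D_ characterisation
lemma pvMain (seq : List Int) (hpre : Pre_directUndirectedTrees seq) :
    ∃ (TB2 : List (List Int)) (a b : Nat), a < b ∧ b < seq.length + 2 ∧
      (a = 0 ↔ D_directUndirectedTrees seq) ∧
      directUndirectedTrees seq
        = pvOrients (TB2 ++ [if a = 0 then [(0 : Int), (b : Int)] else [(b : Int), (a : Int)]]) ∧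
      directUndirectedTrees_alt seq = pvOrients (TB2 ++ [[(b : Int), (a : Int)]]) := by
  unfold directUndirectedTrees directUndirectedTrees_alt
  dsimp only
  set N := seq.length + 2 with hN
  have hN0 : 0 < N := by omega
  have hdom : ∀ i ∈ seq, -(N : Int) ≤ i ∧ i < (N : Int) := by
    intro i hi
    obtain ⟨h1, h2⟩ := hpre i hi
    constructor <;> · rw [hN]; push_cast; omega
  have hlen0 := pvDegInit_len N seq
  have hgd : ∀ x : Nat, x < N → (pvDegInit N seq).getD x 0
      = 1 + (seq.map (fun v => PySem.Int.mod v (N : Int))).count (x : Int) :=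
    fun x hx => by rw [pvDegInit_getD N seq hdom x, if_pos hx]; push_cast; ring
  have hz0 : ((Finset.range N).filter (fun x => (pvDegInit N seq).getD x 0 = 0)) = ∅ := by
    refine Finset.filter_eq_empty_iff.mpr (fun x hx => ?_)
    rw [hgd x (Finset.mem_range.mp hx)]
    omega
  have hinv0 : PvInv N (seq.map (fun v => PySem.Int.mod v (N : Int))) (pvDegInit N seq) := by
    refine ⟨hlen0, fun x hx => Or.inr (hgd x hx), ?_, ?_⟩
    · intro x hx h0
      rw [hgd x hx] at h0
      intro hm
      have := List.count_pos_iff.mpr hm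
      omega
    · rw [hz0]
      simp [hN]
  rw [pvLeaves0_eq N hN0 seq hdom]
  obtain ⟨TB2, deg2, hfa, hfb, hTBlen, hinvF, h5, h6⟩ :=
    pvLoop_sim N seq (pvNewLeaf N seq (pvLastRef N seq)) [] 0 (pvDegInit N seq)
      hdom (pvNewLeaf_PvNL N hN0 seq hdom) hinv0 (by rw [hz0]; simp) rfl
  simp only [List.nil_append, Nat.sub_zero, Nat.zero_add] at hfa hfb hTBlen
  obtain ⟨a, b, hab, hbN, hLf⟩ := pvFinal_two N deg2 hinvF
  -- deg2[0] = 1 ↔ a = 0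
  have hmem0 : deg2.getD 0 0 = 1 ↔ a = 0 := by
    constructor
    · intro h
      have : ((0 : Nat) : Int) ∈ pvLeafList N deg2 :=
        (mem_pvLeafList N deg2 _).mpr ⟨0, by omega, rfl, h⟩
      rw [hLf] at this
      rcases List.mem_cons.mp this with h' | h'
      · omega
      · simp only [List.mem_cons, List.not_mem_nil, or_false] at h'
        omega
    · intro h
      have : ((a : Nat) : Int) ∈ pvLeafList N deg2 := by rw [hLf]; simp
      obtain ⟨x, hxN, hxa, hdx⟩ := (mem_pvLeafList N deg2 _).mp this
      have : x = a := by exact_mod_cast hxa.symm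
      rw [this, h] at hdx
      exact hdx
  -- a = 0 ↔ D_
  have hD : a = 0 ↔ D_directUndirectedTrees seq := by
    unfold D_directUndirectedTrees
    by_cases hemp : seq = []
    · have hdd : deg2 = pvDegInit N seq := h5 hemp
      have : deg2.getD 0 0 = 1 := by
        rw [hdd, hgd 0 (by omega), hemp]
        simp
      constructor
      · intro _; exact Or.inl hemp
      · intro _; exact hmem0.mp this
    · obtain ⟨z, hz⟩ : ∃ z, seq.getLast? = some z := by
        cases h : seq.getLast? with
        | none => exact absurd (List.getLast?_eq_none_iff.mp h) hemp
        | some z => exact ⟨z, rfl⟩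
      have hzmem : z ∈ seq := List.mem_of_getLast? hz
      obtain ⟨hz1, hz2⟩ := hdom z hzmem
      have hzc : (seq.map (fun v => PySem.Int.mod v (N : Int))).getLast?
          = some (PySem.Int.mod z (N : Int)) := by
        rw [List.getLast?_map, hz]
        rfl
      have h6' := h6 (PySem.Int.mod z (N : Int)) hzc
      have hmodz : PySem.Int.mod z (N : Int) = 0 ↔ (z = 0 ∨ z = -(N : Int)) := by
        rw [PySem.Int.mod_eq_emod_of_pos (by exact_mod_cast hN0)]
        by_cases h0 : 0 ≤ z
        · rw [Int.emod_eq_of_lt h0 hz2]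
          constructor
          · exact fun h => Or.inl h
          · rintro (h | h)
            · exact h
            · omega
        · have hzz : z % (N : Int) = z + (N : Int) := by
            have h4 : (z + (N : Int) * 1) % (N : Int) = z % (N : Int) :=
              Int.add_mul_emod_self_left z (N : Int) 1
            rw [mul_one] at h4
            rw [← h4, Int.emod_eq_of_lt (by omega) (by omega)]
          rw [hzz]
          constructor
          · intro h; right; omega
          · rintro (h | h) <;> omega
      constructor
      · intro ha
        have := hmodz.mp (h6'.mp (hmem0.mpr ha))
        rcases this with h' | h'
        · exact Or.inr (Or.inl (by rw [hz, h']))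
        · refine Or.inr (Or.inr ?_)
          rw [hz, h']
          congr 1
      · rintro (h' | h' | h')
        · exact absurd h' hemp
        · rw [hz] at h'
          have : z = 0 := by injection h'
          exact hmem0.mp (h6'.mpr (hmodz.mpr (Or.inl this)))
        · rw [hz] at h'
          have hzz : z = -((seq.length : Int) + 2) := by injection h'
          have : z = -(N : Int) := by rw [hzz, hN]; push_cast; ring
          exact hmem0.mp (h6'.mpr (hmodz.mpr (Or.inr this)))
  refine ⟨TB2, a, b, hab, hbN, hD, ?_, ?_⟩
  · -- A's output
    rw [hfa]
    dsimp only
    have hFf : (List.range N).filter (fun j => deg2.getD j 0 == 1) = [a, b] := by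
      have hmap : ((List.range N).filter (fun j => deg2.getD j 0 == 1)).map
          (fun j : Nat => (j : Int)) = [(a : Int), (b : Int)] := hLf
      rcases hFc : (List.range N).filter (fun j => deg2.getD j 0 == 1)
          with _ | ⟨x, _ | ⟨y, _ | ⟨zz, tl⟩⟩⟩ <;> rw [hFc] at hmap <;> simp at hmap
      obtain ⟨hx, hy⟩ := hmap
      rw [hx, hy]
    have hUV := pvUV_two deg2 (List.range N) a b hFf
    rw [hUV]
    have hrep1 : N - 1 - seq.length = 1 := by omega
    rw [hrep1, List.replicate_one]
    have hslen : (TB2 ++ [([] : List Int)]).length - 1 = TB2.length := by simp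
    rw [hslen]
    have hsetT : ∀ e : List Int,
        (TB2 ++ [([] : List Int)]).set TB2.length e = TB2 ++ [e] := fun e => by simp
    by_cases ha : a = 0
    · rw [if_pos ha, if_pos ha]
      dsimp only
      rw [hsetT]
      exact pvOrient_eq' _ (N - 1) (by simp [hTBlen]; omega)
    · rw [if_neg ha, if_neg ha]
      dsimp only
      rw [hsetT]
      exact pvOrient_eq' _ (N - 1) (by simp [hTBlen]; omega)
  · -- B's output
    rw [hfb]
    dsimp only
    rw [hLf]

-- ===== VERDICT (by name: the statement is the Claim_ definition above) =====
theorem directUndirectedTrees_spec : Claim_unchanged_directUndirectedTrees := by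
  intro seq _ hpre
  unfold Spec_directUndirectedTrees
  intro hnd
  obtain ⟨TB2, a, b, hab, hbN, hD, hA, hB⟩ := pvMain seq hpre
  have ha : a ≠ 0 := fun h => hnd (hD.mp h)
  rw [hA, hB, if_neg ha]

theorem directUndirectedTrees_changed : Claim_changed_directUndirectedTrees := by
  unfold Claim_changed_directUndirectedTrees; decide

theorem directUndirectedTrees_tight : Claim_exact_directUndirectedTrees := by
  intro seq _ hpre hd
  obtain ⟨TB2, a, b, hab, hbN, hD, hA, hB⟩ := pvMain seq hpre
  have ha : a = 0 := hD.mpr hd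
  rw [hA, hB, if_pos ha]
  intro heq
  have hh := congrArg List.head? heq
  rw [pvOrients_head?, pvOrients_head?] at hh
  simp only [Option.some.injEq, List.map_append, List.map_cons, List.map_nil] at hh
  have hl := congrArg List.getLast? hh
  rw [List.getLast?_concat, List.getLast?_concat] at hl
  simp only [List.getD_cons_zero, List.getD_cons_succ, Option.some.injEq,
    Prod.mk.injEq] at hl
  omega
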